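-- pv_equiv track=rewrite | github.com/jiwwnn/algorithm | 프로그래머스/1/140108. 문자열 나누기/문자열 나누기.py | solution
-- ===== SOURCE A (Python) =====
-- def solution(s):
--     count = 0
--     i = 0
--
--     while i < len(s):
--         x = s[i]
--         x_count = 0
--         other_count = 0
--
--         for j in range(i, len(s)):
--             if s[j] == x:
--                 x_count += 1
--             else:
--                 other_count += 1
--
--             if x_count == other_count:
--                 count += 1
--                 i = j + 1  # 다음 분리 시작점으로 이동
--                 break
--         else:
--             # 끝까지 가도 개수가 같아지지 않으면 남은 부분 하나로 분리
--             count += 1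
--             break
--
--     return count
-- ===== SOURCE B (Python) =====
-- def solution(s):
--     count = 0
--     bal = 0
--     x = None
--     for ch in s:
--         if bal == 0:
--             x = ch
--             bal = 1
--         elif ch == x:
--             bal += 1
--         else:
--             bal -= 1
--             if bal == 0:
--                 count += 1
--     if bal > 0:
--         count += 1
--     return count
-- ===== Notes on version B (the rewrite author's own statement) =====
-- stated objective: simpler
-- what changed: Replaces A's nested while/for with index bookkeeping (restarting an inner counting scan at each segment) by one flat for-loop over the characters that maintains a single running balance, counting a segment each time the balance returns to zero and adding one for an unclosed tail.
import Mathlib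
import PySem

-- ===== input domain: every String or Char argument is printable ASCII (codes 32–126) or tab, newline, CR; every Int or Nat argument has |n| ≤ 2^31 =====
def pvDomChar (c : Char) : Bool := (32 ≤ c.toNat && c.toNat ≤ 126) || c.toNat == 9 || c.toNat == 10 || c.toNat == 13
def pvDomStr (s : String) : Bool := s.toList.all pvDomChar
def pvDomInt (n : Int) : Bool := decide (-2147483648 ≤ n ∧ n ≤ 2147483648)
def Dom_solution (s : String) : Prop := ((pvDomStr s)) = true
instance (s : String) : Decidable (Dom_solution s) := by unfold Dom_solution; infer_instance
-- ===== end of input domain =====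

-- B replaces A's nested loops (inner counting scan restarted per segment) by one flat
-- balance-counting pass; same values, simpler decomposition ("objective": simpler).

-- ===== PORT A =====
-- inner for-loop of A: for j from current i, count x / non-x chars; on equality break,
-- returning the suffix after j (the new start position); none = loop ran to the end.
def innerA (x : Char) : List Char → Int → Int → Option (List Char)
  | [], _, _ => none
  | c :: rest, xc, oc =>
    let xc' := if c == x then xc + 1 else xc
    let oc' := if c == x then oc else oc + 1
    if xc' == oc' then some rest else innerA x rest xc' oc'

-- used by outerA's termination (cited in decreasing_by)
theorem innerA_length_lt (x : Char) : ∀ (l : List Char) (xc oc : Int) (r : List Char),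
    innerA x l xc oc = some r → r.length < l.length := by
  intro l
  induction l with
  | nil => intro xc oc r h; simp [innerA] at h
  | cons c rest ih =>
    intro xc oc r h
    by_cases hc : (c == x) = true <;>
      simp only [innerA, hc, if_pos, Bool.false_eq_true, if_neg, not_false_iff] at h <;>
      split at h
    · cases h; simp
    · have := ih _ _ _ h; simp; omega
    · cases h; simp
    · have := ih _ _ _ h; simp; omega

-- outer while-loop of A over the remaining suffix (i ↦ the suffix s[i:])
def outerA : List Char → Int
  | [] => 0
  | c :: rest =>
    match h : innerA c (c :: rest) 0 0 with
    | some rest' => 1 + outerA rest'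
    | none => 1
termination_by l => l.length
decreasing_by exact innerA_length_lt _ _ _ _ _ h

def solution (s : String) : Int := outerA s.toList

-- ===== PORT B =====
def loopB : List Char → Option Char → Int → Int → Int
  | [], _, bal, count => if bal > 0 then count + 1 else count
  | ch :: rest, x, bal, count =>
    if bal == 0 then loopB rest (some ch) 1 count
    else if some ch == x then loopB rest x (bal + 1) count
    else if bal - 1 == 0 then loopB rest x 0 (count + 1)
    else loopB rest x (bal - 1) count

def solution_alt (s : String) : Int := loopB s.toList none 0 0

-- ===== PRECONDITION & SPEC =====
def Spec_solution (s : String) (out : Int) : Prop := out = solution_alt s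
instance (s : String) (out : Int) : Decidable (Spec_solution s out) := by unfold Spec_solution; infer_instance

-- ===== CLAIM (what is proved, stated in full; the proofs are below) =====
def Claim_equal_solution : Prop := ∀ (s : String), Dom_solution s → Spec_solution s (solution s)

-- ===== LEMMAS AND PROOFS =====

-- innerA depends only on the difference of its two counters
theorem innerA_shift (x : Char) : ∀ (l : List Char) (a b d : Int),
    innerA x l (a + d) (b + d) = innerA x l a b := by
  intro l
  induction l with
  | nil => intro a b d; simp [innerA]
  | cons c rest ih =>
    intro a b d
    simp only [innerA]
    by_cases hc : c == x
    · simp only [hc, if_pos]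
      have : (a + d + 1 == b + d) = (a + 1 == b) := by
        rw [Bool.eq_iff_iff]; simp only [beq_iff_eq]; omega
      rw [this]
      split
      · rfl
      · have := ih (a + 1) b d
        rw [show a + d + 1 = a + 1 + d by ring]; exact this
    · simp only [hc, if_neg, Bool.false_eq_true, not_false_iff]
      have : (a + d == b + d + 1) = (a == b + 1) := by
        rw [Bool.eq_iff_iff]; simp only [beq_iff_eq]; omega
      rw [this]
      split
      · rfl
      · have := ih a (b + 1) d
        rw [show b + d + 1 = b + 1 + d by ring]; exact this

-- at balance 0 the carried reference char is irrelevant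
theorem loopB_bal0 (l : List Char) (x y : Option Char) (count : Int) :
    loopB l x 0 count = loopB l y 0 count := by
  cases l with
  | nil => simp [loopB]
  | cons c rest => simp [loopB]

-- the inner scan of A, seen through the balance bal = xc - oc ≥ 1
theorem loopB_inner (x : Char) : ∀ (l : List Char) (bal count : Int), 1 ≤ bal →
    loopB l (some x) bal count =
      match innerA x l bal 0 with
      | some rest' => loopB rest' none 0 (count + 1)
      | none => count + 1 := by
  intro l
  induction l with
  | nil =>
    intro bal count hb
    simp only [innerA, loopB]
    rw [if_pos (by omega)]
  | cons c rest ih =>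
    intro bal count hb
    simp only [innerA, loopB]
    rw [if_neg (by simp; omega)]
    by_cases hc : c == x
    · have hx : (some c == some x) = true := by simp [beq_iff_eq] at hc ⊢; exact hc
      simp only [hc, hx, if_pos]
      have hne : (bal + 1 == (0:Int)) = false := by simp; omega
      rw [hne]
      simp only [Bool.false_eq_true, if_neg, not_false_iff]
      exact ih (bal + 1) count (by omega)
    · have hx : (some c == some x) = false := by
        rw [Bool.eq_iff_iff]; simp only [beq_iff_eq, Option.some.injEq]
        simp only [beq_iff_eq] at hc; simp [hc]
      have hc' : (c == x) = false := by simpa using hc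
      simp only [hc', hx, Bool.false_eq_true, if_neg, not_false_iff]
      by_cases h1 : bal = 1
      · subst h1
        rw [if_pos (by norm_num)]
        have : ((1:Int) == 0 + 1) = true := by norm_num
        rw [this]
        simp only [if_pos]
        exact loopB_bal0 rest (some x) none (count + 1)
      · rw [if_neg (by simp; omega)]
        have : ((bal:Int) == 0 + 1) = false := by simp; omega
        rw [this]
        simp only [Bool.false_eq_true, if_neg, not_false_iff]
        have hshift : innerA x rest bal 1 = innerA x rest (bal - 1) 0 := by
          have := innerA_shift x rest (bal - 1) 0 1
          simpa [show bal - 1 + 1 = bal by ring] using this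
        rw [show (0:Int) + 1 = 1 by ring, hshift]
        exact ih (bal - 1) count (by omega)

-- outer correspondence: B's flat loop from balance 0 accumulates A's outer count
theorem outer_eq : ∀ (n : Nat) (l : List Char), l.length ≤ n → ∀ (count : Int) (x : Option Char),
    count + outerA l = loopB l x 0 count := by
  intro n
  induction n with
  | zero =>
    intro l hl count x
    have : l = [] := List.eq_nil_of_length_eq_zero (by omega)
    subst this
    simp [outerA, loopB]
  | succ n ih =>
    intro l hl count x
    cases l with
    | nil => simp [outerA, loopB]
    | cons c rest =>
      simp only [loopB]
      rw [if_pos (show ((0:Int) == 0) = true from rfl)]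
      rw [loopB_inner c rest 1 count (by omega)]
      have hstep : innerA c (c :: rest) 0 0 = innerA c rest 1 0 := by
        simp [innerA]
      rw [← hstep]
      simp only [outerA]
      split
      · next rest' h =>
        rw [h]
        dsimp only
        have hlen := innerA_length_lt c (c :: rest) 0 0 rest' h
        simp only [List.length_cons] at hlen hl
        have := ih rest' (by omega) (count + 1) none
        omega
      · next h =>
        rw [h]

-- ===== VERDICT (by name: the statement is the Claim_ definition above) =====
theorem solution_spec : Claim_equal_solution := by
  intro s _
  show solution s = solution_alt s
  unfold solution solution_alt
  have := outer_eq s.toList.length s.toList le_rfl 0 none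
  omega
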